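-- pv_equiv track=rewrite | github.com/fidabspd/algorithm | codes/baekjoon/1052-물병.py | solution
-- ===== SOURCE A (Python) =====
-- def to_binary(n):
--     b = []
--     one_idx = []
--     i = 0
--     while n:
--         a, n = n%2, n//2
--         b = [a]+b
--         if a == 1:
--             one_idx.append(i)
--         i += 1
--
--     one_idx = sorted(list(map(lambda x: -x+len(b)-1, one_idx)))
--     return b, one_idx
--
-- def to_decimal(b):
--     mul = 1
--     d = 0
--     for i in b[::-1]:
--         d += i*mul
--         mul *= 2
--     return d
--
-- def solution(n, k):
--     b, one_idx = to_binary(n)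
--     if len(one_idx) <= k:
--         return 0
--     answer_b = [-i+1 for i in b[one_idx[k-1]+1:one_idx[-1]]] + \
--                [1] + [0]*(len(b)-one_idx[-1]-1)
--     answer = to_decimal(answer_b)
--     return answer
-- ===== SOURCE B (Python) =====
-- def solution(n, k):
--     digits = []
--     m = n
--     while m:
--         digits.append(m % 2)
--         m //= 2
--     ones = [i for i, d in enumerate(digits) if d]
--     if len(ones) <= k:
--         return 0
--     p = ones[-k]
--     return (1 << p) - n % (1 << p)
-- ===== Notes on version B (the rewrite author's own statement) =====
-- stated objective: simpler
-- what changed: A builds the MSB-first bit array, collects/maps/sorts set-bit indices, then constructs a complemented bit list (slice + flip + carry + zero padding) and decodes it back to an integer; B reads set-bit positions off an LSB digit list and returns the closed form (1 << p) - n % (1 << p) at the k-th highest set bit.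
import Mathlib
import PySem

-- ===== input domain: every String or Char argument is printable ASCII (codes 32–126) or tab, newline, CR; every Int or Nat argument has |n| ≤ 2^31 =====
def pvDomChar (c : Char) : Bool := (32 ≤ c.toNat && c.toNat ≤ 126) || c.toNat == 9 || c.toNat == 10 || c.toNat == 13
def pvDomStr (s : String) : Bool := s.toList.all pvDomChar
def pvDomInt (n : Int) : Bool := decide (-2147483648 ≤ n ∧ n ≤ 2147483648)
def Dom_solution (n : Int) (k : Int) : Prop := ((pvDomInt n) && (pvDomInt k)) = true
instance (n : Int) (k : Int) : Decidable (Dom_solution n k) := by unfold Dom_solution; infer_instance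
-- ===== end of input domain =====

-- B replaces A's bit-array construction (collect/sort set-bit indices, build a
-- complemented-and-carried bit list, decode it) by the closed form 2^p - n mod 2^p
-- at the k-th highest set bit: simpler, one arithmetic step instead of list surgery.


-- ===== PORT A =====
-- the 'while n:' loop of to_binary; fuel n.natAbs+1 is enough for every n ≥ 0
def toBinLoop : Nat → Int → List Int → List Int → Int → List Int × List Int
  | 0, _, b, oneIdx, _ => (b, oneIdx)
  | fuel+1, n, b, oneIdx, i =>
    if n ≠ 0 then
      let a := PySem.Int.mod n 2
      toBinLoop fuel (PySem.Int.floordiv n 2) (a :: b)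
        (if a = 1 then oneIdx ++ [i] else oneIdx) (i + 1)
    else (b, oneIdx)

def toBinary (n : Int) : List Int × List Int :=
  let r := toBinLoop (n.natAbs + 1) n [] [] 0
  (r.1, PySem.List.sorted (r.2.map (fun x => -x + (r.1.length : Int) - 1)) (fun x => x) false)

-- for i in b[::-1]: d += i*mul; mul *= 2   (state = (mul, d))
def toDecimal (b : List Int) : Int :=
  (((PySem.List.slice? b none none (-1)).getD []).foldl
    (fun (st : Int × Int) i => (st.1 * 2, st.2 + i * st.1)) (1, 0)).2

def solution (n : Int) (k : Int) : Int :=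
  let r := toBinary n
  if (r.2.length : Int) ≤ k then 0
  else
    -- one_idx[k-1] / one_idx[-1]: in range on Pre_, default never used there
    let idxK := PySem.List.pyGetD r.2 (k - 1) 0
    let idxL := PySem.List.pyGetD r.2 (-1) 0
    let answerB := (PySem.List.slice r.1 (some (idxK + 1)) (some idxL)).map (fun i => -i + 1)
      ++ [1] ++ List.replicate ((r.1.length : Int) - idxL - 1).toNat 0
    toDecimal answerB

-- ===== PORT B =====
-- the 'while m:' loop of B; fuel n.natAbs+1 is enough for every n ≥ 0
def digitsLoop : Nat → Int → List Int → List Int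
  | 0, _, ds => ds
  | fuel+1, m, ds =>
    if m ≠ 0 then digitsLoop fuel (PySem.Int.floordiv m 2) (ds ++ [PySem.Int.mod m 2]) else ds

def solution_alt (n : Int) (k : Int) : Int :=
  let digits := digitsLoop (n.natAbs + 1) n []
  let ones := ((PySem.List.enumerate digits).filter (fun p => p.2 != 0)).map (·.1)
  if (ones.length : Int) ≤ k then 0
  else
    -- ones[-k]: in range on Pre_; its entries are ≥ 0, so 1 << p is 1 <<< p.toNat
    let p := PySem.List.pyGetD ones (-k) 0
    ((1:Int) <<< p.toNat) - PySem.Int.mod n ((1:Int) <<< p.toNat)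

-- ===== PRECONDITION & SPEC =====
-- Pre_ admits every input on which the Python A returns: it excludes exactly n < 0,
-- where A's digit loop never terminates, and k < 1 - popcount(n), where A's
-- one_idx[k-1] raises IndexError (B's ones[-k] raises IndexError there as well).
def Pre_solution (n : Int) (k : Int) : Prop :=
  0 ≤ n ∧ (((PySem.Int.bitCount n : Nat) : Int) ≤ k ∨ 1 - ((PySem.Int.bitCount n : Nat) : Int) ≤ k)
instance (n : Int) (k : Int) : Decidable (Pre_solution n k) := by unfold Pre_solution; infer_instance
def pvWitness_solution : Int × Int := (13, 2)

def Spec_solution (n : Int) (k : Int) (out : Int) : Prop := out = solution_alt n k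
instance (n : Int) (k : Int) (out : Int) : Decidable (Spec_solution n k out) := by unfold Spec_solution; infer_instance

-- ===== CLAIM (what is proved, stated in full; the proofs are below) =====
def Claim_equal_solution : Prop := ∀ (n : Int) (k : Int), Dom_solution n k → Pre_solution n k → Spec_solution n k (solution n k)

-- ===== LEMMAS AND PROOFS =====

-- LSB-first digit list of a natural number
def bitsN : Nat → List Int
  | 0 => []
  | m+1 => (((m+1) % 2 : Nat) : Int) :: bitsN ((m+1)/2)
decreasing_by exact Nat.div_lt_self (Nat.succ_pos m) (by norm_num)

-- value of an LSB-first digit list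
def vall : List Int → Int
  | [] => 0
  | d :: tl => d + 2 * vall tl

-- positions (from offset i) of the nonzero entries
def onesP : List Int → Int → List Int
  | [], _ => []
  | d :: tl, i => if d ≠ 0 then i :: onesP tl (i+1) else onesP tl (i+1)

def P01 (l : List Int) : Prop := ∀ d ∈ l, d = 0 ∨ d = 1

theorem bitsN_succ (m : Nat) : bitsN (m+1) = (((m+1) % 2 : Nat) : Int) :: bitsN ((m+1)/2) := by
  rw [bitsN]

theorem hmod_cast (m : Nat) : PySem.Int.mod (m : Int) 2 = ((m % 2 : Nat) : Int) := by
  simp only [PySem.Int.mod, Int.fmod_eq_emod]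
  omega
theorem hdiv_cast (m : Nat) : PySem.Int.floordiv (m : Int) 2 = ((m / 2 : Nat) : Int) := by
  simp only [PySem.Int.floordiv]
  have := Int.ofNat_fdiv m 2
  simpa using this.symm

theorem toBinLoop_spec (fuel : Nat) : ∀ (m : Nat) (acc oi : List Int) (i : Int), m ≤ fuel →
    toBinLoop fuel (m : Int) acc oi i = ((bitsN m).reverse ++ acc, oi ++ onesP (bitsN m) i) := by
  induction fuel with
  | zero =>
    intro m acc oi i hm
    have : m = 0 := by omega
    subst this
    simp [toBinLoop, bitsN, onesP]
  | succ fuel ih =>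
    intro m acc oi i hm
    match m with
    | 0 => simp [toBinLoop, bitsN, onesP]
    | m+1 =>
      have hlt : (m+1)/2 < m+1 := Nat.div_lt_self (Nat.succ_pos m) (by norm_num)
      have hfuel : (m+1)/2 ≤ fuel := by omega
      have hne : ((m+1 : Nat) : Int) ≠ 0 := by exact_mod_cast Nat.succ_ne_zero m
      rw [toBinLoop, if_pos hne]
      simp only [hmod_cast, hdiv_cast]
      rw [ih _ _ _ _ hfuel, bitsN_succ]
      rcases Nat.mod_two_eq_zero_or_one (m+1) with h | h <;>
        simp [h, onesP, List.reverse_cons, List.append_assoc]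

theorem digitsLoop_spec (fuel : Nat) : ∀ (m : Nat) (ds : List Int), m ≤ fuel →
    digitsLoop fuel (m : Int) ds = ds ++ bitsN m := by
  induction fuel with
  | zero =>
    intro m ds hm
    have : m = 0 := by omega
    subst this
    simp [digitsLoop, bitsN]
  | succ fuel ih =>
    intro m ds hm
    match m with
    | 0 => simp [digitsLoop, bitsN]
    | m+1 =>
      have hlt : (m+1)/2 < m+1 := Nat.div_lt_self (Nat.succ_pos m) (by norm_num)
      have hfuel : (m+1)/2 ≤ fuel := by omega
      have hne : ((m+1 : Nat) : Int) ≠ 0 := by exact_mod_cast Nat.succ_ne_zero m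
      rw [digitsLoop, if_pos hne]
      simp only [hmod_cast, hdiv_cast]
      rw [ih _ _ hfuel, bitsN_succ]
      simp [List.append_assoc]

theorem ones_of_enumerate (l : List Int) (s : Int) :
    ((PySem.List.enumerate l s).filter (fun p => p.2 != 0)).map (·.1) = onesP l s := by
  induction l generalizing s with
  | nil => simp [onesP, PySem.List.enumerate]
  | cons d tl ih =>
    rw [PySem.List.enumerate_cons]
    by_cases hd : d = 0 <;> simp [onesP, hd, ih]

theorem onesP_append (u v : List Int) (i : Int) :
    onesP (u ++ v) i = onesP u i ++ onesP v (i + u.length) := by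
  induction u generalizing i with
  | nil => simp [onesP]
  | cons d tl ih =>
    by_cases hd : d = 0 <;>
      simp [onesP, hd, ih, List.length_cons] <;>
      rw [show i + 1 + (tl.length : Int) = i + ((tl.length : Int) + 1) from by ring]

theorem onesP_replicate_zero (t : Nat) (i : Int) : onesP (List.replicate t (0:Int)) i = [] := by
  induction t generalizing i with
  | zero => simp [onesP]
  | succ t ih => simp [List.replicate_succ, onesP, ih]

theorem length_onesP (l : List Int) (i : Int) : (onesP l i).length = l.countP (· != 0) := by
  induction l generalizing i with
  | nil => simp [onesP]
  | cons d tl ih =>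
    by_cases hd : d = 0 <;> simp [onesP, hd, ih]

theorem onesP_lb (l : List Int) (i : Int) : ∀ x ∈ onesP l i, i ≤ x := by
  induction l generalizing i with
  | nil => simp [onesP]
  | cons d tl ih =>
    intro x hx
    by_cases hd : d = 0 <;> simp [onesP, hd] at hx
    · have := ih (i+1) x hx
      omega
    · rcases hx with hx | hx
      · omega
      · have := ih (i+1) x hx
        omega

theorem onesP_pairwise (l : List Int) (i : Int) : (onesP l i).Pairwise (· < ·) := by
  induction l generalizing i with
  | nil => simp [onesP]
  | cons d tl ih =>
    by_cases hd : d = 0 <;> simp [onesP, hd]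
    · exact ih (i+1)
    · refine ⟨fun x hx => ?_, ih (i+1)⟩
      have := onesP_lb tl (i+1) x hx
      omega

theorem P01_bitsN (m : Nat) : P01 (bitsN m) := by
  induction m using Nat.strong_induction_on with
  | _ m ih =>
    match m with
    | 0 => intro d hd; simp [bitsN] at hd
    | m+1 =>
      intro d hd
      rw [bitsN_succ] at hd
      rcases List.mem_cons.mp hd with h | h
      · subst h
        rcases Nat.mod_two_eq_zero_or_one (m+1) with h | h <;> simp [h]
      · exact ih ((m+1)/2) (Nat.div_lt_self (Nat.succ_pos m) (by norm_num)) d h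

theorem vall_bitsN (m : Nat) : vall (bitsN m) = (m : Int) := by
  induction m using Nat.strong_induction_on with
  | _ m ih =>
    match m with
    | 0 => simp [bitsN, vall]
    | m+1 =>
      rw [bitsN_succ]
      rw [show vall ((((m+1) % 2 : Nat) : Int) :: bitsN ((m+1)/2))
            = (((m+1) % 2 : Nat) : Int) + 2 * vall (bitsN ((m+1)/2)) from rfl]
      rw [ih ((m+1)/2) (Nat.div_lt_self (Nat.succ_pos m) (by norm_num))]
      push_cast
      omega

theorem vall_append (u v : List Int) : vall (u ++ v) = vall u + 2 ^ u.length * vall v := by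
  induction u with
  | nil => simp [vall]
  | cons d tl ih =>
    simp only [List.cons_append, vall, ih, List.length_cons, pow_succ]
    ring

theorem vall_replicate_zero (t : Nat) : vall (List.replicate t (0:Int)) = 0 := by
  induction t with
  | zero => simp [vall]
  | succ t ih => simp [List.replicate_succ, vall, ih]

theorem vall_nonneg (l : List Int) (h : P01 l) : 0 ≤ vall l := by
  induction l with
  | nil => simp [vall]
  | cons d tl ih =>
    have hd := h d (List.mem_cons_self ..)
    have htl : 0 ≤ vall tl := ih (fun x hx => h x (List.mem_cons_of_mem _ hx))
    show 0 ≤ d + 2 * vall tl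
    omega

theorem vall_lt_two_pow (l : List Int) (h : P01 l) : vall l < 2 ^ l.length := by
  induction l with
  | nil => simp [vall]
  | cons d tl ih =>
    have hd := h d (List.mem_cons_self ..)
    have htl : vall tl < 2 ^ tl.length := ih (fun x hx => h x (List.mem_cons_of_mem _ hx))
    show d + 2 * vall tl < 2 ^ (d :: tl).length
    rw [List.length_cons, pow_succ]
    omega

theorem vall_map_flip (Y : List Int) :
    vall (Y.map (fun i => -i + 1)) = 2 ^ Y.length - 1 - vall Y := by
  induction Y with
  | nil => simp [vall]
  | cons d tl ih =>
    simp only [List.map_cons, vall, ih, List.length_cons, pow_succ]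
    ring

theorem toDecimal_foldl (u : List Int) : ∀ (mul d : Int),
    u.foldl (fun (st : Int × Int) i => (st.1 * 2, st.2 + i * st.1)) (mul, d)
      = (mul * 2 ^ u.length, d + mul * vall u) := by
  induction u with
  | nil => intro mul d; simp [vall]
  | cons x tl ih =>
    intro mul d
    simp only [List.foldl_cons, ih, vall, List.length_cons, pow_succ, Prod.mk.injEq]
    constructor <;> ring

theorem toDecimal_eq (b : List Int) : toDecimal b = vall b.reverse := by
  unfold toDecimal
  rw [PySem.List.slice?_none_none_neg_one]
  simp only [Option.getD_some]
  rw [toDecimal_foldl b.reverse 1 0]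
  ring

theorem sorted_map_antitone (xs : List Int) (L : Int) (h : xs.Pairwise (· < ·)) :
    PySem.List.sorted (xs.map (fun x => -x + L - 1)) (fun x => x) false
      = (xs.map (fun x => -x + L - 1)).reverse := by
  apply PySem.List.sorted_eq_of_perm_of_pairwise_lt
  · exact List.reverse_perm _
  · rw [List.pairwise_reverse, List.pairwise_map]
    exact h.imp (fun hab => by omega)

theorem topSplit (l : List Int) (kn : Nat) (h01 : P01 l) (hk : 1 ≤ kn)
    (hc : kn ≤ l.countP (· != 0)) :
    ∃ Y X, l = Y ++ 1 :: X ∧ X.countP (· != 0) = kn - 1 := by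
  induction l with
  | nil => simp at hc; omega
  | cons d tl ih =>
    by_cases h : kn ≤ tl.countP (· != 0)
    · obtain ⟨Y, X, hYX, hX⟩ := ih (fun x hx => h01 x (List.mem_cons_of_mem _ hx)) h
      exact ⟨d :: Y, X, by rw [hYX]; simp, hX⟩
    · have hd : d = 1 := by
        rcases h01 d (List.mem_cons_self ..) with h0 | h1
        · exfalso
          rw [List.countP_cons, h0] at hc
          simp at hc
          omega
        · exact h1
      refine ⟨[], tl, by simp [hd], ?_⟩
      rw [List.countP_cons, hd] at hc
      simp at hc
      omega

theorem lowestOne (l : List Int) (h01 : P01 l) (hc : 1 ≤ l.countP (· != 0)) :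
    ∃ t rest, l = List.replicate t 0 ++ 1 :: rest ∧ rest.countP (· != 0) = l.countP (· != 0) - 1 := by
  induction l with
  | nil => simp at hc
  | cons d tl ih =>
    rcases h01 d (List.mem_cons_self ..) with h0 | h1
    · have hc' : 1 ≤ tl.countP (· != 0) := by
        rw [List.countP_cons, h0] at hc
        simpa using hc
      obtain ⟨t, rest, hrw, hcnt⟩ := ih (fun x hx => h01 x (List.mem_cons_of_mem _ hx)) hc'
      refine ⟨t + 1, rest, ?_, ?_⟩
      · rw [List.replicate_succ, h0, hrw]
        simp
      · rw [List.countP_cons, h0, hcnt]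
        simp
    · refine ⟨0, tl, by simp [h1], ?_⟩
      rw [List.countP_cons, h1]
      simp

theorem decomp (l : List Int) (kn : Nat) (h01 : P01 l) (hk : 1 ≤ kn)
    (hc : kn + 1 ≤ l.countP (· != 0)) :
    ∃ t Y X, l = List.replicate t 0 ++ 1 :: (Y ++ 1 :: X) ∧ X.countP (· != 0) = kn - 1 := by
  obtain ⟨t, rest, hrw, hcnt⟩ := lowestOne l h01 (by omega)
  have h01r : P01 rest := by
    intro x hx
    exact h01 x (by rw [hrw]; simp [hx])
  obtain ⟨Y, X, hYX, hX⟩ := topSplit rest kn h01r hk (by omega)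
  exact ⟨t, Y, X, by rw [hrw, hYX], hX⟩

-- A's one_idx after map+sort, as one name (proof-side only)
def AIdx (m : Nat) : List Int :=
  ((onesP (bitsN m) 0).map (fun x => -x + ((bitsN m).length : Int) - 1)).reverse

theorem countP_bitsN (m : Nat) : (bitsN m).countP (· != 0) = PySem.Int.bitCount (m : Int) := by
  induction m using Nat.strong_induction_on with
  | _ m ih =>
    match m with
    | 0 => simp [bitsN, PySem.Int.bitCount_zero]
    | m+1 =>
      rw [bitsN_succ, List.countP_cons, ih ((m+1)/2) (Nat.div_lt_self (Nat.succ_pos m) (by norm_num)),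
        PySem.Int.bitCount_natCast (Nat.succ_pos m)]
      rcases Nat.mod_two_eq_zero_or_one (m+1) with h | h <;> simp [h]
      all_goals omega

theorem pyGetD_to_getD_neg (xs : List Int) (kn : Nat) (h1 : 1 ≤ kn) (h2 : kn ≤ xs.length) :
    PySem.List.pyGetD xs (-(kn:Int)) 0 = xs.getD (xs.length - kn) 0 := by
  rw [PySem.List.pyGetD_neg_natCast xs kn 0 h1 h2, List.getD_eq_getElem xs 0 (by omega)]

-- the else-branch of both ports agree, for any effective index 1 ≤ kn ≤ popcount
theorem core (m kn : Nat) (hk1 : 1 ≤ kn) (hle : kn ≤ (onesP (bitsN m) 0).length) :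
    toDecimal ((PySem.List.slice (bitsN m).reverse
        (some ((AIdx m).getD (kn - 1) 0 + 1))
        (some (PySem.List.pyGetD (AIdx m) (-1) 0))).map (fun i => -i + 1)
      ++ [1] ++ List.replicate ((((bitsN m).length : Int)
          - PySem.List.pyGetD (AIdx m) (-1) 0 - 1).toNat) 0)
    = (1:Int) <<< (((onesP (bitsN m) 0).getD ((onesP (bitsN m) 0).length - kn) 0).toNat)
      - PySem.Int.mod (m:Int)
          ((1:Int) <<< (((onesP (bitsN m) 0).getD ((onesP (bitsN m) 0).length - kn) 0).toNat)) := by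
  have h01 : P01 (bitsN m) := P01_bitsN m
  set f : Int → Int := fun x => -x + ((bitsN m).length : Int) - 1 with hf
  by_cases hlt : kn < (onesP (bitsN m) 0).length
  · -- generic case: the k-th highest set bit is strictly above the lowest one
    have hcnt : kn + 1 ≤ (bitsN m).countP (· != 0) := by
      rw [← length_onesP (bitsN m) 0]; omega
    obtain ⟨t, Y, X, hlrw, hX⟩ := decomp (bitsN m) kn h01 hk1 hcnt
    have h01Y : P01 Y := fun x hx => h01 x (by rw [hlrw]; simp [hx])
    set yl := Y.length with hyl
    set xl := X.length with hxl
    have hcX : (onesP X ((t:Int) + 1 + (yl:Int) + 1)).length = kn - 1 := by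
      rw [length_onesP, hX]
    set cY := (onesP Y ((t:Int) + 1)).length with hcYdef
    have hones : onesP (bitsN m) 0
        = ((t:Int) :: onesP Y ((t:Int) + 1))
          ++ ((t:Int) + 1 + (yl:Int)) :: onesP X ((t:Int) + 1 + (yl:Int) + 1) := by
      rw [hlrw, onesP_append, onesP_replicate_zero]
      simp only [List.nil_append, List.length_replicate, onesP, zero_add]
      rw [if_pos (by norm_num : (1:Int) ≠ 0), onesP_append]
      simp only [onesP]
      rw [if_pos (by norm_num : (1:Int) ≠ 0)]
      simp [hyl]
    have hclen : (onesP (bitsN m) 0).length = cY + 1 + kn := by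
      rw [hones]; simp [hcX]; omega
    have hL : (bitsN m).length = t + 1 + yl + 1 + xl := by
      rw [hlrw]; simp; omega
    have hgetB : (onesP (bitsN m) 0).getD ((onesP (bitsN m) 0).length - kn) 0
        = (t:Int) + 1 + (yl:Int) := by
      rw [List.getD_eq_getElem _ _ (by omega)]
      rw [List.getElem_eq_iff,
        show (onesP (bitsN m) 0).length - kn = cY + 1 from by rw [hclen]; omega,
        hones, List.getElem?_append_right (by simp [← hcYdef])]
      rw [show cY + 1 - ((t:Int) :: onesP Y ((t:Int)+1)).length = 0 from by
        simp [← hcYdef]]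
      simp
    have hBval : (1 : Int) <<< (((t:Int) + 1 + (yl:Int)).toNat)
          - PySem.Int.mod (m:Int) ((1:Int) <<< (((t:Int) + 1 + (yl:Int)).toNat))
        = 2 ^ (t + 1 + yl) - 2 ^ t * (1 + 2 * vall Y) := by
      have htn : ((t:Int) + 1 + (yl:Int)).toNat = t + 1 + yl := by omega
      rw [htn, Int.shiftLeft_eq, one_mul]
      congr 1
      have hval : (m : Int) = vall (List.replicate t 0 ++ 1 :: Y)
          + 2 ^ (t + 1 + yl) * vall (1 :: X) := by
        rw [← vall_bitsN m, hlrw,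
          show List.replicate t (0:Int) ++ 1 :: (Y ++ 1 :: X)
            = (List.replicate t 0 ++ 1 :: Y) ++ (1 :: X) from by simp,
          vall_append]
        congr 2
        simp [hyl]; omega
      have hlow : vall (List.replicate t (0:Int) ++ 1 :: Y) = 2 ^ t * (1 + 2 * vall Y) := by
        rw [vall_append, vall_replicate_zero]
        simp [vall]
      have h01low : P01 (List.replicate t (0:Int) ++ 1 :: Y) := by
        intro x hx
        rcases List.mem_append.mp hx with hx | hx
        · left; exact List.eq_of_mem_replicate hx
        · rcases List.mem_cons.mp hx with hx | hx
          · right; exact hx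
          · exact h01Y x hx
      have hlow0 : 0 ≤ vall (List.replicate t (0:Int) ++ 1 :: Y) := vall_nonneg _ h01low
      have hlowlt : vall (List.replicate t (0:Int) ++ 1 :: Y) < 2 ^ (t + 1 + yl) := by
        have := vall_lt_two_pow _ h01low
        simpa [hyl, add_assoc, add_comm, add_left_comm] using this
      rw [PySem.Int.mod, Int.fmod_eq_emod, if_pos (Or.inl (by positivity)), add_zero, hval,
        Int.add_mul_emod_self_left, Int.emod_eq_of_lt hlow0 hlowlt, hlow]
    have hAidx : AIdx m
        = ((onesP X ((t:Int) + 1 + (yl:Int) + 1)).map f).reverse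
          ++ f ((t:Int) + 1 + (yl:Int))
            :: (((onesP Y ((t:Int) + 1)).map f).reverse ++ [f (t:Int)]) := by
      rw [AIdx, hones, hf]
      simp [List.reverse_append, List.append_assoc]
    have hfp : f ((t:Int) + 1 + (yl:Int)) = ((xl : Nat) : Int) := by
      simp only [hf, hL]; push_cast; ring
    have hft : f (t:Int) = ((xl + 1 + yl : Nat) : Int) := by
      simp only [hf, hL]; push_cast; ring
    have hidxK : (AIdx m).getD (kn - 1) 0 = ((xl : Nat) : Int) := by
      rw [hAidx]
      have hlx : (((onesP X ((t:Int) + 1 + (yl:Int) + 1)).map f).reverse).length = kn - 1 := by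
        simp [hcX]
      rw [List.getD_eq_getElem?_getD, List.getElem?_append_right (by omega)]
      simp [hlx, hfp]
    have hidxL : PySem.List.pyGetD (AIdx m) (-1) 0 = ((xl + 1 + yl : Nat) : Int) := by
      rw [hAidx,
        show ((onesP X ((t:Int) + 1 + (yl:Int) + 1)).map f).reverse
              ++ f ((t:Int) + 1 + (yl:Int))
                :: (((onesP Y ((t:Int) + 1)).map f).reverse ++ [f (t:Int)])
            = (((onesP X ((t:Int) + 1 + (yl:Int) + 1)).map f).reverse
              ++ f ((t:Int) + 1 + (yl:Int)) :: ((onesP Y ((t:Int) + 1)).map f).reverse)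
              ++ [f (t:Int)] from by simp,
        PySem.List.pyGetD_neg_one_append_singleton, hft]
    rw [hidxK, hidxL, hgetB, hBval]
    have hrev : (bitsN m).reverse
        = (X.reverse ++ [1]) ++ (Y.reverse ++ 1 :: List.replicate t 0) := by
      rw [hlrw]; simp [List.reverse_append]
    have hslice : PySem.List.slice (bitsN m).reverse (some (((xl:Nat):Int) + 1))
        (some ((xl + 1 + yl : Nat) : Int)) = Y.reverse := by
      rw [show (((xl:Nat):Int) + 1) = ((xl + 1 : Nat) : Int) from by push_cast; ring,
        PySem.List.slice_natCast, hrev,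
        List.drop_left' (by simp [hxl]),
        show xl + 1 + yl - (xl + 1) = yl from by omega,
        List.take_left' (by simp [hyl])]
    rw [hslice]
    have hrepl : (((bitsN m).length : Int) - ((xl + 1 + yl : Nat) : Int) - 1).toNat = t := by
      rw [hL]; push_cast; omega
    rw [hrepl, toDecimal_eq]
    have hdec : (Y.reverse.map (fun i => -i + 1) ++ [1] ++ List.replicate t 0).reverse
        = List.replicate t (0:Int) ++ 1 :: Y.map (fun i => -i + 1) := by
      simp [List.reverse_append, List.map_reverse]
    rw [hdec, vall_append, vall_replicate_zero,
      show vall (1 :: Y.map (fun i => -i + 1)) = 1 + 2 * vall (Y.map (fun i => -i + 1)) from rfl,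
      vall_map_flip]
    simp only [List.length_replicate]
    rw [show t + 1 + yl = t + (1 + yl) from by omega, pow_add, pow_add, pow_one]
    ring
  · -- degenerate case kn = popcount: the chosen bit IS the lowest set bit
    have hknc : kn = (onesP (bitsN m) 0).length := by omega
    have hc1 : 1 ≤ (bitsN m).countP (· != 0) := by
      rw [← length_onesP (bitsN m) 0]; omega
    obtain ⟨t, R, hlrw, hRc⟩ := lowestOne (bitsN m) h01 hc1
    set rl := R.length with hrl
    have hones : onesP (bitsN m) 0 = (t:Int) :: onesP R ((t:Int) + 1) := by
      rw [hlrw, onesP_append, onesP_replicate_zero]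
      simp only [List.nil_append, List.length_replicate, onesP, zero_add]
      rw [if_pos (by norm_num : (1:Int) ≠ 0)]
    have hL : (bitsN m).length = t + 1 + rl := by rw [hlrw]; simp; omega
    have hlenR : (onesP R ((t:Int) + 1)).length = kn - 1 := by
      rw [length_onesP, hRc, hknc, length_onesP]
    have hgetB : (onesP (bitsN m) 0).getD ((onesP (bitsN m) 0).length - kn) 0 = (t:Int) := by
      rw [← hknc, Nat.sub_self, hones]
      rfl
    have hAidx : AIdx m = ((onesP R ((t:Int) + 1)).map f).reverse ++ [f (t:Int)] := by
      rw [AIdx, hones, hf]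
      simp
    have hft : f (t:Int) = ((rl : Nat) : Int) := by
      simp only [hf, hL]; push_cast; ring
    have hidxK : (AIdx m).getD (kn - 1) 0 = ((rl : Nat) : Int) := by
      rw [hAidx, List.getD_eq_getElem?_getD, List.getElem?_append_right (by simp [hlenR])]
      simp [hlenR, hft]
    have hidxL : PySem.List.pyGetD (AIdx m) (-1) 0 = ((rl : Nat) : Int) := by
      rw [hAidx, PySem.List.pyGetD_neg_one_append_singleton, hft]
    rw [hidxK, hidxL, hgetB, Int.toNat_natCast, Int.shiftLeft_eq, one_mul]
    have hslice : PySem.List.slice (bitsN m).reverse (some (((rl:Nat):Int) + 1))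
        (some ((rl:Nat):Int)) = [] := by
      rw [show (((rl:Nat):Int) + 1) = ((rl + 1 : Nat) : Int) from by push_cast; ring,
        PySem.List.slice_natCast]
      simp [show rl - (rl + 1) = 0 from by omega]
    rw [hslice]
    have hrepl : (((bitsN m).length : Int) - ((rl:Nat):Int) - 1).toNat = t := by
      rw [hL]; push_cast; omega
    rw [hrepl, toDecimal_eq]
    have hmod0 : PySem.Int.mod (m:Int) (2 ^ t) = 0 := by
      have hval : (m : Int) = 2 ^ t * vall (1 :: R) := by
        rw [← vall_bitsN m, hlrw, vall_append, vall_replicate_zero]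
        simp
      rw [PySem.Int.mod, Int.fmod_eq_emod, if_pos (Or.inl (by positivity)), add_zero, hval]
      simp [Int.mul_emod_right]
    rw [hmod0]
    have hdec : ((List.map (fun i => -i + 1) ([] : List Int)) ++ [1] ++ List.replicate t 0).reverse
        = List.replicate t (0:Int) ++ [1] := by
      simp
    rw [hdec, vall_append, vall_replicate_zero]
    simp [vall]

theorem main_eq (n k : Int) (hn : 0 ≤ n)
    (hpre : ((PySem.Int.bitCount n : Nat) : Int) ≤ k
      ∨ 1 - ((PySem.Int.bitCount n : Nat) : Int) ≤ k) :
    solution n k = solution_alt n k := by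
  obtain ⟨m, rfl⟩ : ∃ m : Nat, n = (m : Int) := ⟨n.toNat, (Int.toNat_of_nonneg hn).symm⟩
  have hna : ((m : Int)).natAbs = m := Int.natAbs_natCast m
  have hbin : toBinLoop (m + 1) (m:Int) [] [] 0 = ((bitsN m).reverse, onesP (bitsN m) 0) := by
    simpa using toBinLoop_spec (m+1) m [] [] 0 (by omega)
  have hdig : digitsLoop (m + 1) (m:Int) [] = bitsN m := by
    simpa using digitsLoop_spec (m+1) m [] (by omega)
  have hcc : (onesP (bitsN m) 0).length = PySem.Int.bitCount (m:Int) := by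
    rw [length_onesP, countP_bitsN]
  rw [← hcc] at hpre
  simp only [solution, solution_alt, toBinary, hna, hbin, hdig, ones_of_enumerate,
    List.length_reverse, PySem.List.length_sorted, List.length_map]
  by_cases hcond : (((onesP (bitsN m) 0).length : Nat) : Int) ≤ k
  · rw [if_pos hcond, if_pos hcond]
  · rw [if_neg hcond, if_neg hcond]
    rw [sorted_map_antitone _ _ (onesP_pairwise (bitsN m) 0)]
    rw [show ((onesP (bitsN m) 0).map (fun x => -x + ((bitsN m).length : Int) - 1)).reverse
        = AIdx m from rfl]
    have hlenA : (AIdx m).length = (onesP (bitsN m) 0).length := by simp [AIdx]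
    have hc1 : 1 ≤ (onesP (bitsN m) 0).length := by
      by_contra h
      rcases hpre with h' | h'
      · omega
      · omega
    by_cases hk1 : 1 ≤ k
    · -- ordinary k ≥ 1
      obtain ⟨kn, rfl⟩ : ∃ kn : Nat, k = (kn : Int) :=
        ⟨k.toNat, (Int.toNat_of_nonneg (by omega)).symm⟩
      have hkn1 : 1 ≤ kn := by exact_mod_cast hk1
      have hknc : kn ≤ (onesP (bitsN m) 0).length := by omega
      rw [show ((kn:Int) - 1) = ((kn - 1 : Nat) : Int) from by omega,
        PySem.List.pyGetD_natCast,
        pyGetD_to_getD_neg _ kn hkn1 hknc]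
      exact core m kn hkn1 hknc
    · -- k ≤ 0: Python's negative-index wraparound, same effective position
      have hlow : 1 - ((onesP (bitsN m) 0).length : Int) ≤ k := by
        rcases hpre with h | h
        · exfalso; omega
        · exact h
      obtain ⟨kn, hkn1, hknc, hkeq⟩ :
          ∃ kn : Nat, 1 ≤ kn ∧ kn ≤ (onesP (bitsN m) 0).length
            ∧ k = (kn : Int) - ((onesP (bitsN m) 0).length : Int) :=
        ⟨(k + (onesP (bitsN m) 0).length).toNat, by omega, by omega, by omega⟩
      rw [show k - 1 = -((((onesP (bitsN m) 0).length - kn + 1 : Nat)) : Int) from by omega,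
        pyGetD_to_getD_neg (AIdx m) _ (by omega) (by rw [hlenA]; omega),
        show (AIdx m).length - ((onesP (bitsN m) 0).length - kn + 1) = kn - 1 from by
          rw [hlenA]; omega,
        show -k = (((onesP (bitsN m) 0).length - kn : Nat) : Int) from by omega,
        PySem.List.pyGetD_natCast]
      exact core m kn hkn1 hknc

-- ===== VERDICT (by name: the statement is the Claim_ definition above) =====
theorem solution_spec : Claim_equal_solution := by
  intro n k _ hpre
  unfold Spec_solution
  exact main_eq n k hpre.1 hpre.2
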